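-- pv_equiv track=rewrite | github.com/JSebastian-Villa/Analisis_de_algoritmos | dyv.py | son_positivos
-- ===== SOURCE A (Python) =====
-- def son_positivos(arreglo, inicio, fin):
--     if inicio == fin:
--         if arreglo[inicio] > 0:
--             return True
--         else:
--             return False
--
--     medio = (inicio + fin) // 2
--
--     izq_positivo = son_positivos(arreglo, inicio, medio)
--     der_positivo = son_positivos(arreglo, medio + 1, fin)
--
--     return izq_positivo and der_positivo
-- ===== SOURCE B (Python) =====
-- def son_positivos(arreglo, inicio, fin):
--     return min(arreglo[i] for i in range(inicio, fin + 1)) > 0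
-- ===== Notes on version B (the rewrite author's own statement) =====
-- stated objective: simpler
-- what changed: Replaces the divide-and-conquer boolean recursion with a one-line linear reduction: take min() over the range and compare it to 0.
import Mathlib
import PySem

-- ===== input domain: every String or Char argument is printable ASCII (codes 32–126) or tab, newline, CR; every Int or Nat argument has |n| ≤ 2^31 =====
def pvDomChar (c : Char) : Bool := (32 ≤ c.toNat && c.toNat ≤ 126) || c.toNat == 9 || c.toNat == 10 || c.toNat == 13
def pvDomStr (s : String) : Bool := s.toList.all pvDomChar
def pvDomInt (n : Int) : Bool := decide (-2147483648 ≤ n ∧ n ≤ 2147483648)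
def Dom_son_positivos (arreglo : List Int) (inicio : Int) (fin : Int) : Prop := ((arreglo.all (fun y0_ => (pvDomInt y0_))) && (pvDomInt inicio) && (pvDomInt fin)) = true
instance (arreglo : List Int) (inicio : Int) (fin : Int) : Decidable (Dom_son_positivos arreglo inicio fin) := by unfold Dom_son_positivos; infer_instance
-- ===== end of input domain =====

-- B replaces A's divide-and-conquer boolean recursion by a single linear min() reduction over the range; objective: simpler.


-- midpoint bounds, used by port A's termination proof
lemma mid_bounds (inicio fin : Int) (h : inicio < fin) :
    inicio ≤ PySem.Int.floordiv (inicio + fin) 2 ∧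
    PySem.Int.floordiv (inicio + fin) 2 < fin := by
  have hb := PySem.Int.floordiv_two_mid_bounds (lo := inicio) (hi := fin) (by omega)
  refine ⟨hb.1, ?_⟩
  rcases lt_or_eq_of_le hb.2 with h' | h'
  · exact h'
  · exfalso
    have := PySem.Int.floordiv_eq_iff_of_pos (a := inicio + fin) (b := 2) (q := fin) (by omega)
    rw [this] at h'
    omega

-- ===== PORT A =====
-- Literal port of A's recursion. Python never returns when fin < inicio
-- (unbounded recursion → RecursionError, outside Pre_); the guard only makes the Lean recursion total.
def son_positivos (arreglo : List Int) (inicio : Int) (fin : Int) : Bool :=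
  if inicio = fin then
    match PySem.List.pyGet? arreglo inicio with
    | some v => decide (v > 0)   -- arreglo[inicio] > 0
    | none => false              -- IndexError in Python (outside Pre_)
  else if fin < inicio then false  -- Python recurses forever here (outside Pre_); totality guard
  else
    let medio := PySem.Int.floordiv (inicio + fin) 2
    let izq_positivo := son_positivos arreglo inicio medio
    let der_positivo := son_positivos arreglo (medio + 1) fin
    izq_positivo && der_positivo
termination_by (fin - inicio).toNat
decreasing_by
  · have h := mid_bounds inicio fin (by omega)
    omega
  · have h := mid_bounds inicio fin (by omega)
    omega

-- ===== PORT B =====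
-- min(arreglo[i] for i in range(inicio, fin + 1)) > 0
-- (Python raises ValueError on an empty range and IndexError on a bad index — both outside Pre_)
def son_positivos_alt (arreglo : List Int) (inicio : Int) (fin : Int) : Bool :=
  match PySem.List.min?
      ((PySem.List.pyRange inicio (fin + 1) 1).map
        (fun i => (PySem.List.pyGet? arreglo i).getD 0))   -- getD 0: IndexError in Python, outside Pre_
      (fun v => v) with
  | some m => decide (m > 0)
  | none => false   -- ValueError (empty range) in Python, outside Pre_

-- ===== PRECONDITION & SPEC =====
-- Pre_ is exactly where Python A returns: a nonempty range whose indices all lie in [-len, len)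
-- (otherwise A raises IndexError, or RecursionError when fin < inicio).
def Pre_son_positivos (arreglo : List Int) (inicio : Int) (fin : Int) : Prop :=
  -(arreglo.length : Int) ≤ inicio ∧ inicio ≤ fin ∧ fin < (arreglo.length : Int)
instance (arreglo : List Int) (inicio : Int) (fin : Int) : Decidable (Pre_son_positivos arreglo inicio fin) := by unfold Pre_son_positivos; infer_instance
def pvWitness_son_positivos : List Int × Int × Int := ([2, -1, 3], 0, 2)

def Spec_son_positivos (arreglo : List Int) (inicio : Int) (fin : Int) (out : Bool) : Prop := out = son_positivos_alt arreglo inicio fin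
instance (arreglo : List Int) (inicio : Int) (fin : Int) (out : Bool) : Decidable (Spec_son_positivos arreglo inicio fin out) := by unfold Spec_son_positivos; infer_instance

-- ===== CLAIM (what is proved, stated in full; the proofs are below) =====
def Claim_equal_son_positivos : Prop := ∀ (arreglo : List Int) (inicio : Int) (fin : Int), Dom_son_positivos arreglo inicio fin → Pre_son_positivos arreglo inicio fin → Spec_son_positivos arreglo inicio fin (son_positivos arreglo inicio fin)

-- ===== LEMMAS AND PROOFS =====

-- the per-index value both sides test (0 stands for the excluded IndexError)
def val (arreglo : List Int) (i : Int) : Int := (PySem.List.pyGet? arreglo i).getD 0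

-- 'every index in [inicio, fin] has a positive value' — the common characterisation
def allpos (arreglo : List Int) (inicio fin : Int) : Bool :=
  (PySem.List.pyRange inicio (fin + 1) 1).all (fun i => decide (val arreglo i > 0))

lemma leaf_eq (arreglo : List Int) (i : Int) :
    (match PySem.List.pyGet? arreglo i with
     | some v => decide (v > 0)
     | none => false) = decide (val arreglo i > 0) := by
  unfold val
  cases PySem.List.pyGet? arreglo i <;> simp

lemma foldl_min_pos (t : List Int) (x : Int) :
    0 < t.foldl min x ↔ 0 < x ∧ ∀ y ∈ t, 0 < y := by
  induction t generalizing x with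
  | nil => simp
  | cons y t ih =>
    simp only [List.foldl_cons, ih, lt_min_iff, List.mem_cons]
    constructor
    · rintro ⟨⟨hx, hy⟩, h⟩
      exact ⟨hx, fun z hz => hz.elim (fun e => e ▸ hy) (h z)⟩
    · rintro ⟨hx, h⟩
      exact ⟨⟨hx, h y (Or.inl rfl)⟩, fun z hz => h z (Or.inr hz)⟩

lemma alt_eq_allpos (arreglo : List Int) (inicio fin : Int) (h : inicio ≤ fin) :
    son_positivos_alt arreglo inicio fin = allpos arreglo inicio fin := by
  unfold son_positivos_alt allpos
  rw [PySem.List.pyRange_one_cons (by omega : inicio < fin + 1)]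
  rw [List.map_cons, PySem.List.min?_id_cons]
  rw [Bool.eq_iff_iff]
  simp only [decide_eq_true_eq, foldl_min_pos, List.all_cons,
    Bool.and_eq_true, List.all_eq_true, List.mem_map, decide_eq_true_eq,
    forall_exists_index, and_imp]
  constructor
  · rintro ⟨hx, h'⟩
    exact ⟨hx, fun i hi => h' _ i hi rfl⟩
  · rintro ⟨hx, h'⟩
    exact ⟨hx, fun y i hi e => e ▸ h' i hi⟩

lemma allpos_split (arreglo : List Int) (inicio m fin : Int)
    (h1 : inicio ≤ m) (h2 : m ≤ fin) :
    allpos arreglo inicio fin = (allpos arreglo inicio m && allpos arreglo (m + 1) fin) := by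
  unfold allpos
  rw [PySem.List.pyRange_one_append inicio (m + 1) (fin + 1) (by omega) (by omega),
      List.all_append]

lemma allpos_singleton (arreglo : List Int) (i : Int) :
    allpos arreglo i i = decide (val arreglo i > 0) := by
  unfold allpos
  rw [PySem.List.pyRange_one_singleton]
  simp [List.all]

lemma a_eq_allpos (arreglo : List Int) (inicio fin : Int) (h : inicio ≤ fin) :
    son_positivos arreglo inicio fin = allpos arreglo inicio fin := by
  rw [son_positivos]
  by_cases heq : inicio = fin
  · subst heq
    rw [if_pos rfl, leaf_eq, allpos_singleton]
  · have hlt : inicio < fin := lt_of_le_of_ne h heq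
    have hm := mid_bounds inicio fin hlt
    simp only [if_neg heq, if_neg (by omega : ¬ fin < inicio)]
    rw [a_eq_allpos arreglo inicio _ hm.1, a_eq_allpos arreglo _ fin (by omega),
        allpos_split arreglo inicio _ fin hm.1 (by omega)]
termination_by (fin - inicio).toNat
decreasing_by
  · have h := mid_bounds inicio fin (by omega)
    omega
  · have h := mid_bounds inicio fin (by omega)
    omega

-- ===== VERDICT (by name: the statement is the Claim_ definition above) =====
theorem son_positivos_spec : Claim_equal_son_positivos := by
  intro arreglo inicio fin _ hpre
  unfold Spec_son_positivos
  rw [a_eq_allpos arreglo inicio fin hpre.2.1, alt_eq_allpos arreglo inicio fin hpre.2.1]
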